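-- pv_equiv track=rewrite | github.com/kadragon/oop_python_ex | student_result/2019/01_number_baseball/baseball [2-6 유A].py | correct_input
-- ===== SOURCE A (Python) =====
-- def correct_input(x): # 사용자가 정확하게 입력했는지 확인하는 함수
--
--     if x==' ': # 비어있으면 False를 리턴한다
--         return False
--
--     for i in x: # 입력에 0~9 까지의 숫자 이외의 문자가 있으면 False를 리턴한다
--         if i < '0' or i > '9':
--             return False
--
--     for i in range(0,len(x)): # 사용자의 입력에 중복되는 숫자가 있으면 False를 리턴한다
--         for j in range(0,len(x)):
--             if i != j:
--                 if x[i] == x[j]: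
--                     return False
--
--     return True
-- ===== SOURCE B (Python) =====
-- def correct_input(x):
--     if x == ' ':
--         return False
--     if any(not ('0' <= c <= '9') for c in x):
--         return False
--     return len(set(x)) == len(x)
-- ===== Notes on version B (the rewrite author's own statement) =====
-- stated objective: simpler
-- what changed: Replaces the O(n^2) nested index-pair duplicate scan with a single set construction compared against the string length (and an any() digit check instead of an explicit loop).
import Mathlib
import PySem

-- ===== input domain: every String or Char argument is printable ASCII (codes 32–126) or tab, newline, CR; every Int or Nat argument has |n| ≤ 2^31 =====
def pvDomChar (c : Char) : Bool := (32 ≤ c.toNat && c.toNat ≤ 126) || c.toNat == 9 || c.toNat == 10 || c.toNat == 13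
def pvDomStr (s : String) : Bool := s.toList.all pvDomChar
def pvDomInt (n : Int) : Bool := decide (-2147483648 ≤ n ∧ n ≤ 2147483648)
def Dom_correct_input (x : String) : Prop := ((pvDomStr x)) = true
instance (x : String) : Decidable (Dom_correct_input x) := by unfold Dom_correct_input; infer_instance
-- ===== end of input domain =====

-- B replaces A's O(n^2) nested index-pair duplicate scan with a single set construction
-- whose size is compared against the string length (simpler, asymptotically faster).

-- ===== PORT A =====
def correct_input (x : String) : Bool :=
  -- if x == ' ': return False
  if x == " " then false
  -- for i in x: if i < '0' or i > '9': return False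
  else if x.toList.any (fun i => decide (i < '0') || decide ('9' < i)) then false
  -- for i in range(0,len(x)): for j in range(0,len(x)): if i != j and x[i] == x[j]: return False
  else if (PySem.List.pyRange 0 (x.toList.length : Int) 1).any (fun i =>
            (PySem.List.pyRange 0 (x.toList.length : Int) 1).any (fun j =>
              (i != j) && (PySem.List.pyGetD x.toList i ' ' == PySem.List.pyGetD x.toList j ' ')))
  then false
  else true

-- ===== PORT B =====
def correct_input_alt (x : String) : Bool :=
  if x == " " then false
  else if x.toList.any (fun c => !(decide ('0' ≤ c) && decide (c ≤ '9'))) then false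
  else PySem.Set.len (PySem.Set.ofList x.toList) == (x.toList.length : Int)

-- ===== PRECONDITION & SPEC =====
def Spec_correct_input (x : String) (out : Bool) : Prop := out = correct_input_alt x
instance (x : String) (out : Bool) : Decidable (Spec_correct_input x out) := by unfold Spec_correct_input; infer_instance

-- ===== CLAIM (what is proved, stated in full; the proofs are below) =====
def Claim_equal_correct_input : Prop := ∀ (x : String), Dom_correct_input x → Spec_correct_input x (correct_input x)

-- ===== LEMMAS AND PROOFS =====

-- the two digit guards agree pointwise
lemma digit_guard_eq (c : Char) :
    (decide (c < '0') || decide ('9' < c)) = (!(decide ('0' ≤ c) && decide (c ≤ '9'))) := by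
  by_cases h1 : c < '0'
  · simp [h1, not_le.mpr h1]
  · by_cases h2 : '9' < c
    · simp [h1, h2, not_le.mpr h2, not_lt.mp h1]
    · simp [h1, h2, not_lt.mp h1, not_lt.mp h2]

-- foldl of Set.add grows by at most one element per input element
lemma foldl_add_le {α : Type} [BEq α] (l s : List α) :
    (List.foldl PySem.Set.add s l).length ≤ s.length + l.length := by
  induction l generalizing s with
  | nil => simp
  | cons a t ih =>
    simp only [List.foldl_cons, List.length_cons]
    have h1 : (PySem.Set.add s a).length ≤ s.length + 1 := by
      unfold PySem.Set.add; split <;> simp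
    have h2 := ih (PySem.Set.add s a)
    omega

-- exact length is reached iff every element is fresh
lemma foldl_add_len_iff {α : Type} [BEq α] [LawfulBEq α] (l : List α) (s : List α) :
    (List.foldl PySem.Set.add s l).length = s.length + l.length ↔
      (l.Nodup ∧ ∀ a ∈ l, a ∉ s) := by
  induction l generalizing s with
  | nil => simp
  | cons a t ih =>
    simp only [List.foldl_cons, List.nodup_cons, List.mem_cons, List.length_cons]
    by_cases h : a ∈ s
    · have hc : s.contains a = true := by simpa using h
      have hadd : PySem.Set.add s a = s := by simp [PySem.Set.add, h]
      rw [hadd]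
      constructor
      · intro hlen
        exfalso
        have := foldl_add_le t s
        omega
      · rintro ⟨-, hfresh⟩
        exact absurd h (hfresh a (Or.inl rfl))
    · have hc : s.contains a = false := by simpa using h
      have hadd : PySem.Set.add s a = s ++ [a] := by simp [PySem.Set.add, h]
      have harith : s.length + (t.length + 1) = (s ++ [a]).length + t.length := by
        simp; omega
      rw [hadd, harith, ih (s ++ [a])]
      constructor
      · rintro ⟨ht, hfresh⟩
        have hat : a ∉ t := fun hm => (hfresh a hm) (by simp)
        refine ⟨⟨hat, ht⟩, ?_⟩
        rintro b (rfl | hb)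
        · exact h
        · intro hbs; exact hfresh b hb (by simp [hbs])
      · rintro ⟨⟨hat, ht⟩, hfresh⟩
        refine ⟨ht, fun b hb => ?_⟩
        have hbs : b ∉ s := hfresh b (Or.inr hb)
        have hba : b ≠ a := fun h' => hat (h' ▸ hb)
        simp [hbs, hba]

lemma ofList_len_iff {α : Type} [BEq α] [LawfulBEq α] (l : List α) :
    ((PySem.Set.ofList l).length = l.length ↔ l.Nodup) := by
  have := foldl_add_len_iff l ([] : List α)
  simpa [PySem.Set.ofList, PySem.Set.empty] using this

-- A's nested index scan detects exactly a duplicate (i.e. ¬ Nodup)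
lemma scan_eq_not_nodup (l : List Char) :
    ((PySem.List.pyRange 0 (l.length : Int) 1).any (fun i =>
       (PySem.List.pyRange 0 (l.length : Int) 1).any (fun j =>
         (i != j) && (PySem.List.pyGetD l i ' ' == PySem.List.pyGetD l j ' '))))
    = !decide l.Nodup := by
  by_cases hnd : l.Nodup
  · -- nodup: the scan finds nothing
    simp only [hnd, decide_true, Bool.not_true]
    rw [List.any_eq_false]
    intro i hi
    simp only [Bool.not_eq_true]
    rw [List.any_eq_false]
    intro j hj
    rw [PySem.List.mem_pyRange_one] at hi hj
    obtain ⟨hi0, hin⟩ := hi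
    obtain ⟨hj0, hjn⟩ := hj
    lift i to Nat using hi0
    lift j to Nat using hj0
    have hin' : i < l.length := by exact_mod_cast hin
    have hjn' : j < l.length := by exact_mod_cast hjn
    by_cases hij : i = j
    · simp [hij]
    · have hne : l[i] ≠ l[j] := by
        intro h
        have h2 : (⟨i, hin'⟩ : Fin l.length) = ⟨j, hjn'⟩ :=
          (List.nodup_iff_injective_getElem.mp hnd) h
        exact hij (congrArg Fin.val h2)
      have hijz : (i : Int) ≠ (j : Int) := by exact_mod_cast hij
      simp [PySem.List.pyGetD_natCast, List.getElem?_eq_getElem hin',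
            List.getElem?_eq_getElem hjn', hne, hijz]
  · -- not nodup: scan finds a pair
    simp only [hnd, decide_false, Bool.not_false]
    rw [List.nodup_iff_injective_getElem] at hnd
    simp only [Function.Injective, not_forall] at hnd
    obtain ⟨i, j, hEq, hne⟩ := hnd
    rw [List.any_eq_true]
    refine ⟨((i : Nat) : Int), ?_, ?_⟩
    · rw [PySem.List.mem_pyRange_one]
      exact ⟨by positivity, by exact_mod_cast i.isLt⟩
    · rw [List.any_eq_true]
      refine ⟨((j : Nat) : Int), ?_, ?_⟩
      · rw [PySem.List.mem_pyRange_one]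
        exact ⟨by positivity, by exact_mod_cast j.isLt⟩
      · have hijne : ((i : Nat) : Int) ≠ ((j : Nat) : Int) := by
          intro h
          exact hne (Fin.ext (by exact_mod_cast h))
        have h1 : PySem.List.pyGetD l ((i : Nat) : Int) ' ' = l[(i : Nat)] := by
          rw [PySem.List.pyGetD_natCast]
          exact List.getD_eq_getElem l ' ' i.isLt
        have h2 : PySem.List.pyGetD l ((j : Nat) : Int) ' ' = l[(j : Nat)] := by
          rw [PySem.List.pyGetD_natCast]
          exact List.getD_eq_getElem l ' ' j.isLt
        simp [h1, h2, hEq, hijne]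

-- ===== VERDICT (by name: the statement is the Claim_ definition above) =====
theorem correct_input_spec : Claim_equal_correct_input := by
  intro x _
  unfold Spec_correct_input correct_input correct_input_alt
  by_cases hsp : (x == " ") = true
  · rw [if_pos hsp, if_pos hsp]
  · rw [if_neg hsp, if_neg hsp]
    have hdig : (x.toList.any (fun i => decide (i < '0') || decide ('9' < i)))
        = (x.toList.any (fun c => !(decide ('0' ≤ c) && decide (c ≤ '9')))) := by
      simp only [digit_guard_eq]
    rw [hdig]
    by_cases hd : (x.toList.any (fun c => !(decide ('0' ≤ c) && decide (c ≤ '9')))) = true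
    · rw [if_pos hd, if_pos hd]
    · rw [if_neg hd, if_neg hd, scan_eq_not_nodup x.toList]
      by_cases hN : x.toList.Nodup
      · have hlen : (PySem.Set.ofList x.toList).length = x.toList.length :=
          (ofList_len_iff x.toList).mpr hN
        simp only [hN, decide_true, Bool.not_true, Bool.false_eq_true, if_false,
          PySem.Set.len, hlen]
        simp
      · have hlen : (PySem.Set.ofList x.toList).length ≠ x.toList.length :=
          fun hl => hN ((ofList_len_iff x.toList).mp hl)
        simp only [hN, decide_false, Bool.not_false, if_true, PySem.Set.len]
        symm
        rw [beq_eq_false_iff_ne]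
        intro h
        exact hlen (by exact_mod_cast h)
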